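-- pv_equiv track=rewrite | github.com/ashleyleal/quick-sheet | app/processing/generate_sheet.py | build_ordered_blocks
-- ===== SOURCE A (Python) =====
-- TYPE_PRIORITY = {
--     "formula":      1,
--     "definition":   2,
--     "diagram_hint": 3,
--     "example":      4,
--     "concept":      5,
-- }
--
-- CONTENT_SUFFIXES  = {"notes_result", "slides_result", "misc_result"}
--
-- def build_ordered_blocks(
--     all_data: dict[str, dict],
--     topic_ranking: list[tuple[str, int]],
-- ) -> list[dict]:
--     """
--     Collect ALL blocks from content sources (notes, slides, misc) and order by:
--
--     Primary:   Topic importance score (exam frequency, descending)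
--                — high-frequency exam topics always appear first
--     Secondary: Content type within a topic:
--                formula(1) → definition(2) → diagram(3) → example(4) → concept(5)
--     Tertiary:  Alphabetical topic name for ties
--     """
--     exam_scores: dict[str, int] = {t.lower(): c for t, c in topic_ranking}
--
--     def topic_score(topic: str) -> int:
--         tl = topic.lower()
--         if tl in exam_scores:
--             return exam_scores[tl]
--         return max(
--             (score for key, score in exam_scores.items() if key in tl or tl in key),
--             default=0,
--         )
--
--     all_blocks: list[dict] = []
--     for suffix, data in all_data.items():
--         if not any(suffix.startswith(c.split("_")[0]) for c in CONTENT_SUFFIXES):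
--             continue
--         for block in data.get("blocks", []):
--             all_blocks.append(block)
--
--     def sort_key(block: dict) -> tuple:
--         topic = block.get("topic", "")
--         btype = block.get("type", "concept")
--         return (
--             -topic_score(topic),              # 1. high exam frequency first
--             TYPE_PRIORITY.get(btype, 99),     # 2. formula→def→diagram→example→concept
--             topic.lower(),                    # 3. alphabetical for ties
--         )
--
--     return sorted(all_blocks, key=sort_key)
-- ===== SOURCE B (Python) =====
-- TYPE_PRIORITY = {
--     "formula":      1,
--     "definition":   2,
--     "diagram_hint": 3,
--     "example":      4,
--     "concept":      5,
-- }
--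
--
-- def build_ordered_blocks(all_data, topic_ranking):
--     """Bucket grouping instead of sorting the blocks: blocks are grouped in one
--     pass under their (type-priority, topic) bucket, only the distinct buckets are
--     sorted (by -score, priority, topic), and the buckets are concatenated; the
--     per-bucket insertion order reproduces the stable sort exactly."""
--     exam_scores = {}
--     for t, c in topic_ranking:
--         exam_scores[t.lower()] = c
--
--     def topic_score(tl):
--         if tl in exam_scores:
--             return exam_scores[tl]
--         return max(
--             (score for key, score in exam_scores.items() if key in tl or tl in key),
--             default=0,
--         )
--
--     groups = {}
--     for suffix, data in all_data.items():
--         if suffix.startswith(("notes", "slides", "misc")):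
--             for block in data.get("blocks", []):
--                 tl = block.get("topic", "").lower()
--                 pr = TYPE_PRIORITY.get(block.get("type", "concept"), 99)
--                 groups.setdefault((pr, tl), []).append(block)
--
--     order = sorted(groups, key=lambda k: (-topic_score(k[1]), k))
--     return [block for key in order for block in groups[key]]
-- ===== Notes on version B (the rewrite author's own statement) =====
-- stated objective: alternative
-- what changed: B replaces A's comparison sort of all n blocks by bucket grouping: one pass files each block under its (type-priority, lowercased-topic) bucket dict, only the distinct buckets are sorted by (-topic_score, priority, topic), and the buckets are concatenated, which reproduces the stable sort exactly and computes the fuzzy topic score once per distinct bucket instead of once per block.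
import Mathlib
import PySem

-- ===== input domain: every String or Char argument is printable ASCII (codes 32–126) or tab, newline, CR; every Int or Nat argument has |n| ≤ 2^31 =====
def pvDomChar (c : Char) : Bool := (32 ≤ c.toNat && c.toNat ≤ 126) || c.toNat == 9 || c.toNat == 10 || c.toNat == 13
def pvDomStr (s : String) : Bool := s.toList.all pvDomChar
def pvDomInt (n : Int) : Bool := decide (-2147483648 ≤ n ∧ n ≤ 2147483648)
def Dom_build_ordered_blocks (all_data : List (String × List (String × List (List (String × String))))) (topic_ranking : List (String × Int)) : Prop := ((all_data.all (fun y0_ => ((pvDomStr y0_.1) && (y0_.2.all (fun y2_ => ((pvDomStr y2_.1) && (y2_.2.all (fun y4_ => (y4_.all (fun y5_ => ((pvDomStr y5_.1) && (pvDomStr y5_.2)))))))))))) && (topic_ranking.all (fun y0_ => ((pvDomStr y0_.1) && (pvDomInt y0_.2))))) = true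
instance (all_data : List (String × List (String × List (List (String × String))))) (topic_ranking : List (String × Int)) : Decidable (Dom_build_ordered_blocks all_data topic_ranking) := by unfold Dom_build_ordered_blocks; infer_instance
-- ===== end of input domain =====

-- B replaces A's comparison sort of all blocks by bucket grouping: one pass files each block
-- under its (type-priority, topic) bucket, only the distinct buckets are sorted, and the
-- buckets are concatenated (an alternative algorithm of the same asymptotic cost).

-- shared module-level context: TYPE_PRIORITY and the dict .get(…) lookups (first match in the assoc list)
def pvTYPE_PRIORITY : PySem.Dict String Int :=
  PySem.Dict.ofList [("formula", 1), ("definition", 2), ("diagram_hint", 3), ("example", 4), ("concept", 5)]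

def pvGetStr (b : List (String × String)) (k dflt : String) : String :=
  ((b.find? (fun p => p.1 == k)).map (·.2)).getD dflt

def pvGetBlocks (d : List (String × List (List (String × String)))) (k : String) : List (List (String × String)) :=
  ((d.find? (fun p => p.1 == k)).map (·.2)).getD []

-- exam_scores = {t.lower(): c for t, c in topic_ranking}  (shared first line of A and B)
def pvExamScores (topic_ranking : List (String × Int)) : PySem.Dict String Int :=
  topic_ranking.foldl (fun d p => d.insert (PySem.Str.lower p.1) p.2) PySem.Dict.empty

-- ===== PORT A =====
-- any(suffix.startswith(c.split("_")[0]) for c in CONTENT_SUFFIXES); c.split("_") is never empty,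
-- so the [0] (which would raise on an empty list) is ported with a default — exact here.
def pvAnyContentA (suffix : String) : Bool :=
  [("notes_result" : String), "slides_result", "misc_result"].any
    (fun c => PySem.Str.startswith suffix (((PySem.Str.split? c "_").getD []).getD 0 ""))

-- topic_score(topic): tl = topic.lower(); exact exam_scores hit, else max(matching scores, default=0)
def pvTopicScoreA (es : PySem.Dict String Int) (topic : String) : Int :=
  let tl := PySem.Str.lower topic
  match es.get? tl with
  | some s => s
  | none =>
      PySem.List.maxD
        ((es.items.filter (fun p => PySem.Str.isIn p.1 tl || PySem.Str.isIn tl p.1)).map (·.2))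
        (fun x => x) 0

-- sort_key(block): the tuple key split as sorted2's two components (PYSEM's tuple-key idiom)
def pvSortKeyA1 (es : PySem.Dict String Int) (b : List (String × String)) : Int :=
  -(pvTopicScoreA es (pvGetStr b "topic" ""))

def pvSortKeyA2 (b : List (String × String)) : Lex (Int × String) :=
  toLex (pvTYPE_PRIORITY.getD (pvGetStr b "type" "concept") 99, PySem.Str.lower (pvGetStr b "topic" ""))

def build_ordered_blocks (all_data : List (String × List (String × List (List (String × String))))) (topic_ranking : List (String × Int)) : List (List (String × String)) :=
  let exam_scores := pvExamScores topic_ranking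
  let all_blocks := all_data.foldl
    (fun acc sd =>
      if pvAnyContentA sd.1 then (pvGetBlocks sd.2 "blocks").foldl (fun a blk => a ++ [blk]) acc
      else acc) []
  PySem.List.sorted2 all_blocks (pvSortKeyA1 exam_scores) pvSortKeyA2 false

-- ===== PORT B =====
def pvIsContentB (suffix : String) : Bool :=
  PySem.Str.startswith suffix "notes" || PySem.Str.startswith suffix "slides" || PySem.Str.startswith suffix "misc"

-- topic_score(tl): exactly A's helper, but on the already-lowered topic
def pvTopicScoreB (es : PySem.Dict String Int) (tl : String) : Int :=
  match es.get? tl with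
  | some s => s
  | none =>
      PySem.List.maxD
        ((es.items.filter (fun p => PySem.Str.isIn p.1 tl || PySem.Str.isIn tl p.1)).map (·.2))
        (fun x => x) 0

-- the bucket of a block: (TYPE_PRIORITY.get(type, 99), topic.lower())
def pvGKey (b : List (String × String)) : Int × String :=
  (pvTYPE_PRIORITY.getD (pvGetStr b "type" "concept") 99, PySem.Str.lower (pvGetStr b "topic" ""))

-- the bucket-sort key (-topic_score(tl), (pr, tl)) split as sorted2's two components
def pvBKey1 (es : PySem.Dict String Int) (k : Int × String) : Int :=
  -(pvTopicScoreB es k.2)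

def pvBKey2 (k : Int × String) : Lex (Int × String) :=
  toLex (k.1, k.2)

def build_ordered_blocks_alt (all_data : List (String × List (String × List (List (String × String))))) (topic_ranking : List (String × Int)) : List (List (String × String)) :=
  let exam_scores := pvExamScores topic_ranking
  let groups := all_data.foldl
    (fun g sd =>
      if pvIsContentB sd.1 then
        (pvGetBlocks sd.2 "blocks").foldl
          (fun g blk => g.modify (pvGKey blk) [] (fun v => v ++ [blk])) g
      else g) PySem.Dict.empty
  let order := PySem.List.sorted2 groups.keys (pvBKey1 exam_scores) pvBKey2 false
  order.flatMap (fun k => groups.getD k [])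

-- ===== PRECONDITION & SPEC =====
def Spec_build_ordered_blocks (all_data : List (String × List (String × List (List (String × String))))) (topic_ranking : List (String × Int)) (out : List (List (String × String))) : Prop := out = build_ordered_blocks_alt all_data topic_ranking
instance (all_data : List (String × List (String × List (List (String × String))))) (topic_ranking : List (String × Int)) (out : List (List (String × String))) : Decidable (Spec_build_ordered_blocks all_data topic_ranking out) := by unfold Spec_build_ordered_blocks; infer_instance

-- ===== CLAIM (what is proved, stated in full; the proofs are below) =====
def Claim_equal_build_ordered_blocks : Prop := ∀ (all_data : List (String × List (String × List (List (String × String))))) (topic_ranking : List (String × Int)), Dom_build_ordered_blocks all_data topic_ranking → Spec_build_ordered_blocks all_data topic_ranking (build_ordered_blocks all_data topic_ranking)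

-- ===== LEMMAS AND PROOFS =====

-- proof-level combined (lexicographic) keys of the two sorts
def pvSortKeyA (es : PySem.Dict String Int) (b : List (String × String)) : Lex (Int × Lex (Int × String)) :=
  toLex (pvSortKeyA1 es b, pvSortKeyA2 b)

def pvLiftB (es : PySem.Dict String Int) (k : Int × String) : Lex (Int × Lex (Int × String)) :=
  toLex (pvBKey1 es k, pvBKey2 k)

-- sorted2 (a tuple key) is sorted by the corresponding lexicographic key
theorem pvSorted2_eq_sorted {α κ₁ κ₂ : Type} [LinearOrder κ₁] [LinearOrder κ₂]
    (xs : List α) (k1 : α → κ₁) (k2 : α → κ₂) :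
    PySem.List.sorted2 xs k1 k2 false
      = PySem.List.sorted xs (fun x => toLex (k1 x, k2 x)) false := by
  have hcmp : (fun a b => decide (k1 a < k1 b) || (!decide (k1 b < k1 a) && decide (k2 a < k2 b)))
      = (fun a b => decide ((toLex (k1 a, k2 a) : Lex (κ₁ × κ₂)) < toLex (k1 b, k2 b))) := by
    funext a b
    by_cases h1 : k1 a < k1 b
    · simp [h1, Prod.Lex.toLex_lt_toLex]
    · by_cases h2 : k1 b < k1 a
      · simp [h1, h2, Prod.Lex.toLex_lt_toLex, ne_of_gt h2]
      · have he : k1 a = k1 b := le_antisymm (le_of_not_gt h2) (le_of_not_gt h1)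
        by_cases h3 : k2 a < k2 b <;> simp [h3, he, Prod.Lex.toLex_lt_toLex]
  rw [PySem.List.sorted_eq_foldl_insertBy]
  show xs.foldl (fun acc x => PySem.List.insertBy
    (fun a b => decide (k1 a < k1 b) || (!decide (k1 b < k1 a) && decide (k2 a < k2 b))) x acc) [] = _
  rw [hcmp]

-- A's content test equals B's
theorem pvAnyContent_eq (suffix : String) : pvAnyContentA suffix = pvIsContentB suffix := by
  have h1 : ((PySem.Str.split? "notes_result" "_").getD [])[0]?.getD "" = "notes" := by decide
  have h2 : ((PySem.Str.split? "slides_result" "_").getD [])[0]?.getD "" = "slides" := by decide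
  have h3 : ((PySem.Str.split? "misc_result" "_").getD [])[0]?.getD "" = "misc" := by decide
  simp [pvAnyContentA, pvIsContentB, h1, h2, h3, Bool.or_assoc]

-- the flat list of gathered blocks
def pvBlocks (all_data : List (String × List (String × List (List (String × String))))) : List (List (String × String)) :=
  (all_data.filter (fun sd => pvIsContentB sd.1)).flatMap (fun sd => pvGetBlocks sd.2 "blocks")

-- A's gathering loop produces exactly pvBlocks
theorem pvBlocksA_eq (all_data : List (String × List (String × List (List (String × String))))) :
    all_data.foldl
      (fun acc sd =>
        if pvAnyContentA sd.1 then (pvGetBlocks sd.2 "blocks").foldl (fun a blk => a ++ [blk]) acc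
        else acc) []
    = pvBlocks all_data := by
  have h1 := PySem.List.foldl_congr_mem all_data
    (fun (acc : List (List (String × String))) (sd : String × List (String × List (List (String × String)))) =>
      if pvAnyContentA sd.1 then (pvGetBlocks sd.2 "blocks").foldl (fun a blk => a ++ [blk]) acc else acc)
    (fun acc sd => if pvIsContentB sd.1 then acc ++ pvGetBlocks sd.2 "blocks" else acc)
    []
    (by
      intro acc sd _
      simp only [pvAnyContent_eq, PySem.List.foldl_append_singleton_eq_self])
  rw [h1, PySem.List.foldl_if_eq_foldl_filter, PySem.List.foldl_append_eq_flatMap, List.nil_append]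
  rfl

-- B's grouping loop is the same fold taken over the flat block list
theorem pvGroups_eq (all_data : List (String × List (String × List (List (String × String))))) :
    all_data.foldl
      (fun g sd =>
        if pvIsContentB sd.1 then
          (pvGetBlocks sd.2 "blocks").foldl
            (fun g blk => g.modify (pvGKey blk) [] (fun v => v ++ [blk])) g
        else g) PySem.Dict.empty
    = (pvBlocks all_data).foldl
        (fun g blk => g.modify (pvGKey blk) [] (fun v => v ++ [blk])) PySem.Dict.empty := by
  rw [PySem.List.foldl_if_eq_foldl_filter, pvBlocks, List.foldl_flatMap]

-- looking a bucket up returns exactly the blocks of that bucket, in gathering order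
theorem pvGroups_getD (blocks : List (List (String × String))) (k : Int × String) :
    (blocks.foldl (fun g blk => g.modify (pvGKey blk) [] (fun v => v ++ [blk]))
        PySem.Dict.empty).getD k []
    = blocks.filter (fun b => pvGKey b == k) := by
  have h : blocks.foldl (fun g blk => g.modify (pvGKey blk) [] (fun v => v ++ [blk]))
        PySem.Dict.empty
      = (blocks.map (fun b => (pvGKey b, b))).foldl
          (fun d p => d.modify p.1 [] (fun v => v ++ [p.2])) PySem.Dict.empty := by
    rw [List.foldl_map]
  rw [h, PySem.Dict.getD_foldl_modify_append, PySem.Dict.getD_empty, List.nil_append,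
    List.filter_map, List.map_map]
  simp [Function.comp_def]

-- the bucket keys are the distinct block keys in first-occurrence order
theorem pvGroups_keys (blocks : List (List (String × String))) :
    (blocks.foldl (fun g blk => g.modify (pvGKey blk) [] (fun v => v ++ [blk]))
        PySem.Dict.empty).keys
    = PySem.Set.ofList (blocks.map pvGKey) := by
  rw [PySem.Dict.keys_foldl_modify_key, PySem.Dict.keys_empty, PySem.Set.update_nil_left]

-- A's sort key is B's bucket-sort key of the block's bucket (definitional)
theorem pvKey_eq (es : PySem.Dict String Int) (b : List (String × String)) :
    pvSortKeyA es b = pvLiftB es (pvGKey b) := rfl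

-- B's bucket-sort key is injective
theorem pvLiftB_inj (es : PySem.Dict String Int) : Function.Injective (pvLiftB es) := by
  intro a b h
  have h2 : ((a.1, a.2) : Int × String) = (b.1, b.2) := by
    have := congrArg (fun x => ofLex (ofLex x).2) h
    simpa [pvLiftB, pvBKey2] using this
  rw [Prod.mk.injEq] at h2
  exact Prod.ext h2.1 h2.2

-- inserting past a prefix none of whose elements compare after x
theorem pvInsertBy_append {α : Type} (before : α → α → Bool) (x : α) (A S : List α)
    (h : ∀ a ∈ A, before x a = false) :
    PySem.List.insertBy before x (A ++ S) = A ++ PySem.List.insertBy before x S := by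
  induction A with
  | nil => simp
  | cons a t ih =>
      simp only [List.cons_append, PySem.List.insertBy, h a (List.mem_cons_self ..)]
      simp only [Bool.false_eq_true, if_false, List.cons.injEq, true_and]
      exact ih (fun a ha => h a (List.mem_cons_of_mem _ ha))

-- a stable sort pulls the minimum-key elements to the front, in original order
theorem pvSorted_min_split {α κ : Type} [LinearOrder κ] (key : α → κ) (m : κ) :
    ∀ (xs : List α), (∀ x ∈ xs, m ≤ key x) →
      PySem.List.sorted xs key false
        = xs.filter (fun x => decide (key x = m))
          ++ PySem.List.sorted (xs.filter (fun x => decide (key x ≠ m))) key false := by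
  intro xs
  induction xs using List.reverseRecOn with
  | nil => intro _; rfl
  | append_singleton xs x ih =>
      intro hmin
      have hxs : ∀ y ∈ xs, m ≤ key y := fun y hy => hmin y (List.mem_append_left _ hy)
      have hsnoc : ∀ (l : List α),
          PySem.List.sorted (l ++ [x]) key false
            = PySem.List.insertBy (fun a b => decide (key a < key b)) x
                (PySem.List.sorted l key false) := by
        intro l
        rw [PySem.List.sorted_eq_foldl_insertBy, PySem.List.sorted_eq_foldl_insertBy,
          List.foldl_append, List.foldl_cons, List.foldl_nil]
      rw [hsnoc, ih hxs]
      by_cases hx : key x = m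
      · have hA : ∀ a ∈ xs.filter (fun y => decide (key y = m)),
            decide (key x < key a) = false := by
          intro a ha
          have := of_decide_eq_true (List.mem_filter.mp ha).2
          simp [hx, this]
        rw [pvInsertBy_append _ _ _ _ hA]
        have hS : PySem.List.insertBy (fun a b => decide (key a < key b)) x
            (PySem.List.sorted (xs.filter (fun y => decide (key y ≠ m))) key false)
            = x :: PySem.List.sorted (xs.filter (fun y => decide (key y ≠ m))) key false := by
          cases hS : PySem.List.sorted (xs.filter (fun y => decide (key y ≠ m))) key false with
          | nil => rfl
          | cons s t =>
              have hs : s ∈ xs.filter (fun y => decide (key y ≠ m)) := by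
                rw [← PySem.List.mem_sorted (key := key) (rev := false), hS]
                exact List.mem_cons_self ..
              have hne : key s ≠ m := of_decide_eq_true (List.mem_filter.mp hs).2
              have hge : m ≤ key s := hxs s (List.mem_of_mem_filter hs)
              have : key x < key s := hx ▸ lt_of_le_of_ne hge (Ne.symm hne)
              simp [PySem.List.insertBy, this]
        rw [hS, List.filter_append, List.filter_append]
        simp [hx, List.append_assoc]
      · have hgt : m < key x :=
          lt_of_le_of_ne (hmin x (List.mem_append_right _ (List.mem_cons_self ..))) (Ne.symm hx)
        have hA : ∀ a ∈ xs.filter (fun y => decide (key y = m)),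
            decide (key x < key a) = false := by
          intro a ha
          have := of_decide_eq_true (List.mem_filter.mp ha).2
          simp [this, not_lt_of_gt hgt]
        rw [pvInsertBy_append _ _ _ _ hA, ← hsnoc]
        rw [List.filter_append, List.filter_append]
        simp [hx]
  
-- a stable sort equals the concatenation, along any strictly-ordered covering key list,
-- of the equal-bucket sublists in original order
theorem pvSorted_eq_flat_groups {α β κ : Type} [LinearOrder κ] [BEq β] [LawfulBEq β]
    (key : α → κ) (g : α → β) (lift : β → κ) (hk : ∀ x, key x = lift (g x)) :
    ∀ (K : List β) (xs : List α), (K.map lift).Pairwise (· < ·) → (∀ x ∈ xs, g x ∈ K) →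
      PySem.List.sorted xs key false
        = K.flatMap (fun k => xs.filter (fun x => g x == k)) := by
  intro K
  induction K with
  | nil =>
      intro xs _ hcov
      have : xs = [] := List.eq_nil_iff_forall_not_mem.mpr (fun x hx => by simpa using hcov x hx)
      subst this; rfl
  | cons k0 K' ih =>
      intro xs hpw hcov
      rw [List.map_cons, List.pairwise_cons] at hpw
      obtain ⟨h0, hK'⟩ := hpw
      have h0' : ∀ k ∈ K', lift k0 < lift k := fun k hk' => h0 _ (List.mem_map_of_mem hk')
      have hne0 : ∀ k ∈ K', k ≠ k0 := fun k hk' h => absurd (h ▸ h0' k hk') (lt_irrefl _)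
      have hmin : ∀ x ∈ xs, lift k0 ≤ key x := by
        intro x hx
        rcases List.mem_cons.mp (hcov x hx) with h | h
        · rw [hk x, h]
        · exact le_of_lt (hk x ▸ h0' _ (by simpa using h))
      rw [pvSorted_min_split key (lift k0) xs hmin]
      have hf1 : xs.filter (fun x => decide (key x = lift k0)) = xs.filter (fun x => g x == k0) := by
        apply List.filter_congr
        intro x hx
        rcases List.mem_cons.mp (hcov x hx) with h | h
        · have hgx : g x = k0 := by simpa using h
          simp [hk x, hgx]
        · have hlt := h0' _ (by simpa using h)
          have : key x ≠ lift k0 := fun he => absurd (he ▸ hk x ▸ hlt) (lt_irrefl _)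
          have hgx : g x ≠ k0 := hne0 _ (by simpa using h)
          simp [this, hgx]
      have hf2 : xs.filter (fun x => decide (key x ≠ lift k0)) = xs.filter (fun x => !(g x == k0)) := by
        apply List.filter_congr
        intro x hx
        rcases List.mem_cons.mp (hcov x hx) with h | h
        · have hgx : g x = k0 := by simpa using h
          simp [hk x, hgx]
        · have hlt := h0' _ (by simpa using h)
          have : key x ≠ lift k0 := fun he => absurd (he ▸ hk x ▸ hlt) (lt_irrefl _)
          have hgx : g x ≠ k0 := hne0 _ (by simpa using h)
          simp [this, hgx]
      rw [hf1, hf2]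
      have hcov' : ∀ x ∈ xs.filter (fun x => !(g x == k0)), g x ∈ K' := by
        intro x hx
        have hne : ¬ (g x == k0) = true := by simpa using List.of_mem_filter hx
        rcases List.mem_cons.mp (hcov x (List.mem_of_mem_filter hx)) with h | h
        · exact absurd (by simp [h]) hne
        · exact h
      rw [ih _ hK' hcov', List.flatMap_cons]
      congr 1
      apply List.flatMap_congr
      intro k hkK
      rw [List.filter_filter]
      apply List.filter_congr
      intro x _
      by_cases hgx : g x = k
      · simp [hgx, hne0 k hkK]
      · simp [hgx]

-- ===== VERDICT (by name: the statement is the Claim_ definition above) =====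
theorem build_ordered_blocks_spec : Claim_equal_build_ordered_blocks := by
  intro all_data topic_ranking _
  show build_ordered_blocks all_data topic_ranking = build_ordered_blocks_alt all_data topic_ranking
  simp only [build_ordered_blocks, build_ordered_blocks_alt]
  rw [pvBlocksA_eq, pvGroups_eq, pvGroups_keys]
  set es := pvExamScores topic_ranking
  set blocks := pvBlocks all_data
  have hgetD : ∀ k, (blocks.foldl (fun g blk => g.modify (pvGKey blk) [] (fun v => v ++ [blk]))
      PySem.Dict.empty).getD k [] = blocks.filter (fun b => pvGKey b == k) := fun k => pvGroups_getD blocks k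
  simp only [hgetD]
  rw [pvSorted2_eq_sorted blocks (pvSortKeyA1 es) pvSortKeyA2,
    pvSorted2_eq_sorted (PySem.Set.ofList (blocks.map pvGKey)) (pvBKey1 es) pvBKey2]
  apply pvSorted_eq_flat_groups (pvSortKeyA es) pvGKey (pvLiftB es) (fun b => pvKey_eq es b)
    (PySem.List.sorted (PySem.Set.ofList (blocks.map pvGKey)) (pvLiftB es) false)
  · -- strictly increasing key list
    set K := PySem.List.sorted (PySem.Set.ofList (blocks.map pvGKey)) (pvLiftB es) false
    have hperm : K.Perm (PySem.Set.ofList (blocks.map pvGKey)) := PySem.List.sorted_perm ..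
    have hnd : K.Nodup := hperm.nodup_iff.mpr (PySem.Set.nodup_ofList _)
    have hle : K.Pairwise (fun a b => pvLiftB es a ≤ pvLiftB es b) := PySem.List.sorted_pairwise ..
    rw [List.pairwise_map]
    exact (hle.and hnd).imp (fun {a b} h =>
      lt_of_le_of_ne h.1 (fun he => h.2 (pvLiftB_inj es he)))
  · intro x hx
    rw [PySem.List.mem_sorted, PySem.Set.mem_ofList]
    exact List.mem_map_of_mem hx
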